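-- pv_equiv track=rewrite | github.com/josef-br/axiomatic-explanations | src/measure_and_match.py | is_var
-- ===== SOURCE A (Python) =====
-- def is_var(a, b):
--     only_in_d1 = set([term for term in a.keys() if term not in b.keys()])
--     only_in_d2 = set([term for term in b.keys() if term not in a.keys()])
--     return len(only_in_d1) > 0 and \
--             len(only_in_d2) > 0 and \
--             all([a[t1] >= b[t2]
--                  for t1 in only_in_d1
--                  for t2 in only_in_d2])
-- ===== SOURCE B (Python) =====
-- def is_var(a, b):
--     mn = min((v for k, v in a.items() if k not in b), default=None)
--     mx = max((v for k, v in b.items() if k not in a), default=None)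
--     return mn is not None and mx is not None and mn >= mx
-- ===== Notes on version B (the rewrite author's own statement) =====
-- stated objective: faster
-- what changed: Instead of building both key-difference sets and testing every pair a[t1] >= b[t2], B computes in one pass the minimum value over keys only in a and the maximum value over keys only in b and compares them once (all-pairs x>=y iff min >= max).
import Mathlib
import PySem

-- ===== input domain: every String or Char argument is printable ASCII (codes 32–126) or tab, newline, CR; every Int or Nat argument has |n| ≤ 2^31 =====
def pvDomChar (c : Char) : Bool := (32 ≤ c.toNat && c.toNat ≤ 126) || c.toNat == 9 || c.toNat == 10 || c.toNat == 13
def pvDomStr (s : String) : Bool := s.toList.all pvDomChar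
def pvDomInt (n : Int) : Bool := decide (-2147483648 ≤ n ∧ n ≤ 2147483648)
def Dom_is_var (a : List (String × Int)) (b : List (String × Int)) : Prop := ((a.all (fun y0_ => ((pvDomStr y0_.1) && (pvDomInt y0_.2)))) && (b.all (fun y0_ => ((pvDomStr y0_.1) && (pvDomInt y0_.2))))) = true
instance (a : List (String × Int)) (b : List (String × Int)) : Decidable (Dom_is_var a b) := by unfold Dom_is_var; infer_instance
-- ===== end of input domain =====

-- B replaces A's all-pairs value comparison over the two key-difference sets by a single
-- min/max pass: all x >= y over the two value collections iff min of the first >= max of the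
-- second; measured asymptotically faster (O(n+m) vs O(n*m) comparisons).


-- ===== PORT A =====
-- a, b are Python dicts, encoded as association lists (insertion order).
def is_var (a : List (String × Int)) (b : List (String × Int)) : Bool :=
  let da := PySem.Dict.mk a
  let db := PySem.Dict.mk b
  -- only_in_d1 = set([term for term in a.keys() if term not in b.keys()])
  let only_in_d1 := PySem.Set.ofList (da.keys.filter (fun term => !(db.keys.contains term)))
  -- only_in_d2 = set([term for term in b.keys() if term not in a.keys()])
  let only_in_d2 := PySem.Set.ofList (db.keys.filter (fun term => !(da.keys.contains term)))
  decide (PySem.Set.len only_in_d1 > 0) &&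
    (decide (PySem.Set.len only_in_d2 > 0) &&
      -- all([a[t1] >= b[t2] for t1 in only_in_d1 for t2 in only_in_d2])
      -- (a[t1]/b[t2] cannot miss: t1/t2 are keys of a/b; 0 is an unreachable default.
      --  'all' over the set is order-independent, so reading the Set's list order is exact.)
      (only_in_d1.flatMap (fun t1 =>
        only_in_d2.map (fun t2 => decide (da.getD t1 0 ≥ db.getD t2 0)))).all id)

-- ===== PORT B =====
-- mn = min((v for k, v in a.items() if k not in b), default=None)  (and mx symmetrically)
def is_var_alt (a : List (String × Int)) (b : List (String × Int)) : Bool :=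
  let mn := PySem.List.min?
    ((a.filter (fun kv => !((PySem.Dict.mk b).contains kv.1))).map Prod.snd) (fun x => x)
  let mx := PySem.List.max?
    ((b.filter (fun kv => !((PySem.Dict.mk a).contains kv.1))).map Prod.snd) (fun x => x)
  -- mn is not None and mx is not None and mn >= mx
  match mn, mx with
  | some m, some M => decide (m ≥ M)
  | _, _ => false

-- ===== PRECONDITION & SPEC =====
-- Python's arguments are dicts, which cannot hold a key twice; Pre_ restricts the
-- association-list encoding to exactly the lists that represent a dict (no duplicate keys).
def Pre_is_var (a : List (String × Int)) (b : List (String × Int)) : Prop :=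
  (a.map Prod.fst).Nodup ∧ (b.map Prod.fst).Nodup
instance (a : List (String × Int)) (b : List (String × Int)) : Decidable (Pre_is_var a b) := by unfold Pre_is_var; infer_instance
def pvWitness_is_var : (List (String × Int)) × (List (String × Int)) :=
  ([("x", 3), ("z", 5)], [("y", 2), ("w", 1)])

def Spec_is_var (a : List (String × Int)) (b : List (String × Int)) (out : Bool) : Prop := out = is_var_alt a b
instance (a : List (String × Int)) (b : List (String × Int)) (out : Bool) : Decidable (Spec_is_var a b out) := by unfold Spec_is_var; infer_instance

-- ===== CLAIM (what is proved, stated in full; the proofs are below) =====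
def Claim_equal_is_var : Prop := ∀ (a : List (String × Int)) (b : List (String × Int)), Dom_is_var a b → Pre_is_var a b → Spec_is_var a b (is_var a b)

-- ===== LEMMAS AND PROOFS =====

theorem foldl_add_nodup {α : Type} [BEq α] [LawfulBEq α] (xs : List α) :
    ∀ s : List α, (∀ x ∈ xs, x ∉ s) → xs.Nodup → xs.foldl PySem.Set.add s = s ++ xs := by
  induction xs with
  | nil => simp
  | cons x t ih =>
    intro s hdisj hnd
    have hx : x ∉ s := hdisj x (by simp)
    have : PySem.Set.add s x = s ++ [x] := by
      simp [PySem.Set.add, PySem.Set.contains, hx]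
    rw [List.foldl_cons, this, ih (s ++ [x])]
    · simp
    · intro y hy
      simp only [List.mem_append, List.mem_singleton]
      rintro (h | rfl)
      · exact hdisj y (by simp [hy]) h
      · exact (List.nodup_cons.mp hnd).1 hy
    · exact (List.nodup_cons.mp hnd).2

theorem ofList_of_nodup {α : Type} [BEq α] [LawfulBEq α] (xs : List α) (h : xs.Nodup) :
    PySem.Set.ofList xs = xs := by
  rw [PySem.Set.ofList_eq_foldl, foldl_add_nodup xs [] (by simp) h]
  simp

theorem allpairs_eq_minmax (l1 l2 : List Int) :
    (decide (0 < l1.length) && (decide (0 < l2.length) &&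
      (l1.flatMap (fun x => l2.map (fun y => decide (x ≥ y)))).all id))
    = (match PySem.List.min? l1 (fun x => x), PySem.List.max? l2 (fun x => x) with
       | some m, some M => decide (m ≥ M)
       | _, _ => false) := by
  cases h1 : PySem.List.min? l1 (fun x => x) with
  | none =>
    have : l1 = [] := (PySem.List.min?_eq_none_iff l1 _).mp h1
    subst this; simp
  | some m =>
    cases h2 : PySem.List.max? l2 (fun x => x) with
    | none =>
      have : l2 = [] := (PySem.List.max?_eq_none_iff l2 _).mp h2
      subst this; simp
    | some M =>
      have hm := PySem.List.min?_mem h1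
      have hM := PySem.List.max?_mem h2
      have hmin := PySem.List.min?_isMin h1
      have hmax := PySem.List.max?_isMax h2
      have hl1 : 0 < l1.length := List.length_pos_of_mem hm
      have hl2 : 0 < l2.length := List.length_pos_of_mem hM
      rw [Bool.eq_iff_iff]
      simp only [Bool.and_eq_true, decide_eq_true_eq, List.all_eq_true, List.mem_flatMap,
        List.mem_map, id, forall_exists_index, and_imp]
      constructor
      · rintro ⟨-, -, hall⟩
        have := hall (decide (m ≥ M)) m hm M hM rfl
        simpa using this
      · intro hmM
        refine ⟨hl1, hl2, ?_⟩
        rintro bv x hx y hy rfl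
        simp only [decide_eq_true_eq, ge_iff_le]
        exact le_trans (hmax y hy) (le_trans hmM (hmin x hx))

theorem contains_mk_eq {l : List (String × Int)} (t : String) :
    (PySem.Dict.mk l).contains t = (l.map Prod.fst).contains t := by
  simp only [PySem.Dict.contains_mk]
  induction l with
  | nil => simp
  | cons p r ih =>
    simp only [List.any_cons, ih, List.map_cons, List.contains_cons]
    rw [show (t == p.1) = (p.1 == t) from by by_cases h : t = p.1 <;> simp [h, Ne.symm]]

theorem getD_mk_eq (l : List (String × Int)) (hn : (l.map Prod.fst).Nodup)
    {kv : String × Int} (h : kv ∈ l) : (PySem.Dict.mk l).getD kv.1 0 = kv.2 := by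
  exact PySem.Dict.getD_of_mem_items (PySem.Dict.mk l) (by exact h) (by simpa [PySem.Dict.keys_mk] using hn) 0

theorem main_eq (a b : List (String × Int))
    (hna : (a.map Prod.fst).Nodup) (hnb : (b.map Prod.fst).Nodup) :
    is_var a b = is_var_alt a b := by
  have hfm1 : ((a.map Prod.fst).filter (fun t => !((b.map Prod.fst).contains t)))
      = (a.filter (fun kv => !((b.map Prod.fst).contains kv.1))).map Prod.fst :=
    List.filter_map
  have hfm2 : ((b.map Prod.fst).filter (fun t => !((a.map Prod.fst).contains t)))
      = (b.filter (fun kv => !((a.map Prod.fst).contains kv.1))).map Prod.fst :=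
    List.filter_map
  have hset1 : PySem.Set.ofList ((a.filter (fun kv => !((b.map Prod.fst).contains kv.1))).map Prod.fst)
      = (a.filter (fun kv => !((b.map Prod.fst).contains kv.1))).map Prod.fst :=
    ofList_of_nodup _ (hfm1 ▸ hna.filter _)
  have hset2 : PySem.Set.ofList ((b.filter (fun kv => !((a.map Prod.fst).contains kv.1))).map Prod.fst)
      = (b.filter (fun kv => !((a.map Prod.fst).contains kv.1))).map Prod.fst :=
    ofList_of_nodup _ (hfm2 ▸ hnb.filter _)
  simp only [is_var, is_var_alt, PySem.Dict.keys_mk, contains_mk_eq, hfm1, hset1, hfm2, hset2]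
  set L1 := a.filter (fun kv => !((b.map Prod.fst).contains kv.1)) with hL1
  set L2 := b.filter (fun kv => !((a.map Prod.fst).contains kv.1)) with hL2
  rw [← allpairs_eq_minmax (L1.map Prod.snd) (L2.map Prod.snd)]
  have hflat : (L1.map Prod.fst).flatMap (fun t1 => (L2.map Prod.fst).map
        (fun t2 => decide ((PySem.Dict.mk a).getD t1 0 ≥ (PySem.Dict.mk b).getD t2 0)))
      = (L1.map Prod.snd).flatMap (fun x => (L2.map Prod.snd).map (fun y => decide (x ≥ y))) := by
    rw [List.flatMap_map, List.flatMap_map]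
    simp only [List.flatMap_def]
    apply congrArg
    apply List.map_congr_left
    intro kv1 h1
    rw [getD_mk_eq a hna (List.mem_of_mem_filter h1)]
    simp only [List.map_map]
    apply List.map_congr_left
    intro kv2 h2
    simp only [Function.comp]
    rw [getD_mk_eq b hnb (List.mem_of_mem_filter h2)]
  rw [hflat]
  simp [PySem.Set.len]

-- ===== VERDICT (by name: the statement is the Claim_ definition above) =====
theorem is_var_spec : Claim_equal_is_var := by
  intro a b _ hpre
  unfold Spec_is_var
  exact main_eq a b hpre.1 hpre.2
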